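-- pv_equiv track=rewrite | github.com/voun/datascience-ML | data_mining/homework5/ex3c.py | string_kernel
-- ===== SOURCE A (Python) =====
-- def get_2_mers(X):
-- 	list = []
-- 	for i in range(0,len(X)-2):
-- 		if X[i] == "G" and X[i+1] != "G" and X[i+2] != "G":
-- 			list.append(X[i+1:i+3])
-- 	return list
--
-- def string_kernel(X,Y):
--
-- 	s1 = get_2_mers(X)
-- 	s2 = get_2_mers(Y)
-- 	sum = 0
--
-- 	for x in s1:
-- 		for y in s2:
-- 			sum += 1
-- 			sum += 1 if x[0] == y[0] else 0
-- 			sum += 1 if x[1] == y[1] else 0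
-- 	return sum
-- ===== SOURCE B (Python) =====
-- def string_kernel(X, Y):
--     # One pass over Y builds the count of its accepted 2-mers and per-position
--     # character frequency tables; one pass over X then combines the match counts.
--     n2 = 0
--     c0 = {}
--     c1 = {}
--     for i in range(0, len(Y) - 2):
--         if Y[i] == "G" and Y[i + 1] != "G" and Y[i + 2] != "G":
--             n2 += 1
--             c0[Y[i + 1]] = c0.get(Y[i + 1], 0) + 1
--             c1[Y[i + 2]] = c1.get(Y[i + 2], 0) + 1
--     total = 0
--     for i in range(0, len(X) - 2):
--         if X[i] == "G" and X[i + 1] != "G" and X[i + 2] != "G":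
--             total += n2 + c0.get(X[i + 1], 0) + c1.get(X[i + 2], 0)
--     return total
-- ===== Notes on version B (the rewrite author's own statement) =====
-- stated objective: alternative
-- what changed: Replaced the all-pairs comparison of the two extracted 2-mer lists by per-position character frequency tables built in one pass over Y, combined per 2-mer of X (avoids materialising the 2-mer lists and the nested loop).
import Mathlib
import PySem

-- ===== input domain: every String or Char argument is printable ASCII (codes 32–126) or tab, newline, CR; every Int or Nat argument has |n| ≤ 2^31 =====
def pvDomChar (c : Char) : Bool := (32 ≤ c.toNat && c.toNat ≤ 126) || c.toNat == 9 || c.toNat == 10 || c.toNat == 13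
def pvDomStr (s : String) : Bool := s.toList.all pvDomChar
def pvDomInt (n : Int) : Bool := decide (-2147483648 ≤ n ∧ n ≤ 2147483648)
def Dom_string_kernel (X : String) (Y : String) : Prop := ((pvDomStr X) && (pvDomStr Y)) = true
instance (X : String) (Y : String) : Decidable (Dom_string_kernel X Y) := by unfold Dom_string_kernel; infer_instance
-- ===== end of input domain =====

-- B replaces A's all-pairs comparison of the extracted 2-mers by per-position character
-- frequency tables built in one pass over each string (an alternative algorithm); same return value.

-- ===== PORT A =====
def get_2_mers (X : String) : List String :=
  (PySem.List.pyRange 0 (PySem.Str.len X - 2)).foldl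
    (fun acc i =>
      if (PySem.Str.pyGet? X i == some 'G') && !(PySem.Str.pyGet? X (i + 1) == some 'G')
          && !(PySem.Str.pyGet? X (i + 2) == some 'G')
      then acc ++ [PySem.Str.slice X (some (i + 1)) (some (i + 3))]
      else acc) []

def string_kernel (X : String) (Y : String) : Int :=
  let s1 := get_2_mers X
  let s2 := get_2_mers Y
  s1.foldl (fun sum x =>
    s2.foldl (fun sum y =>
      sum + 1 + (if PySem.Str.pyGet? x 0 == PySem.Str.pyGet? y 0 then 1 else 0)
            + (if PySem.Str.pyGet? x 1 == PySem.Str.pyGet? y 1 then 1 else 0)) sum) 0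

-- ===== PORT B =====
def string_kernel_alt (X : String) (Y : String) : Int :=
  let st :=
    (PySem.List.pyRange 0 (PySem.Str.len Y - 2)).foldl
      (fun (st : Int × PySem.Dict (Option Char) Int × PySem.Dict (Option Char) Int) i =>
        if (PySem.Str.pyGet? Y i == some 'G') && !(PySem.Str.pyGet? Y (i + 1) == some 'G')
            && !(PySem.Str.pyGet? Y (i + 2) == some 'G')
        then (st.1 + 1,
              st.2.1.modify (PySem.Str.pyGet? Y (i + 1)) 0 (· + 1),
              st.2.2.modify (PySem.Str.pyGet? Y (i + 2)) 0 (· + 1))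
        else st)
      (0, PySem.Dict.empty, PySem.Dict.empty)
  (PySem.List.pyRange 0 (PySem.Str.len X - 2)).foldl
    (fun total i =>
      if (PySem.Str.pyGet? X i == some 'G') && !(PySem.Str.pyGet? X (i + 1) == some 'G')
          && !(PySem.Str.pyGet? X (i + 2) == some 'G')
      then total + (st.1 + st.2.1.getD (PySem.Str.pyGet? X (i + 1)) 0
                         + st.2.2.getD (PySem.Str.pyGet? X (i + 2)) 0)
      else total) 0

-- ===== PRECONDITION & SPEC =====
def Spec_string_kernel (X : String) (Y : String) (out : Int) : Prop := out = string_kernel_alt X Y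
instance (X : String) (Y : String) (out : Int) : Decidable (Spec_string_kernel X Y out) := by unfold Spec_string_kernel; infer_instance

-- ===== CLAIM (what is proved, stated in full; the proofs are below) =====
def Claim_equal_string_kernel : Prop := ∀ (X : String) (Y : String), Dom_string_kernel X Y → Spec_string_kernel X Y (string_kernel X Y)

-- ===== LEMMAS AND PROOFS =====

-- the accepted loop positions (Python's `X[i]=="G" and X[i+1]!="G" and X[i+2]!="G"`), list side
def pvCond (L : List Char) (i : Nat) : Bool :=
  (L[i]? == some 'G') && !(L[i + 1]? == some 'G') && !(L[i + 2]? == some 'G')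

def pvIdxs (L : List Char) : List Nat :=
  (List.range (L.length - 2)).filter (pvCond L)

-- the common closed form both programs compute
def pvT (L M : List Char) : Int :=
  ((pvIdxs L).map (fun (i : Nat) =>
     ((pvIdxs M).length : Int)
     + (List.countP (fun j => M[j + 1]? == L[i + 1]?) (pvIdxs M) : Int)
     + (List.countP (fun j => M[j + 2]? == L[i + 2]?) (pvIdxs M) : Int))).sum

lemma pvCast1 (k : Nat) : (k : Int) + 1 = ((k + 1 : Nat) : Int) := by push_cast; ring
lemma pvCast2 (k : Nat) : (k : Int) + 2 = ((k + 2 : Nat) : Int) := by push_cast; ring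
lemma pvCast3 (k : Nat) : (k : Int) + 3 = ((k + 3 : Nat) : Int) := by push_cast; ring

lemma pvRange_sub_two (n : Nat) :
    PySem.List.pyRange 0 ((n : Int) - 2) = (List.range (n - 2)).map (fun (k : Nat) => (k : Int)) := by
  rcases Nat.lt_or_ge n 2 with h | h
  · interval_cases n <;> rfl
  · have h2 : ((n : Int) - 2) = ((n - 2 : Nat) : Int) := by omega
    rw [h2, PySem.List.pyRange_zero_natCast]

lemma pvCondInt_eq (S : String) (k : Nat) :
    ((PySem.Str.pyGet? S (k : Int) == some 'G') && !(PySem.Str.pyGet? S ((k : Int) + 1) == some 'G')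
      && !(PySem.Str.pyGet? S ((k : Int) + 2) == some 'G')) = pvCond S.toList k := by
  simp only [pvCast1, pvCast2, PySem.Str.pyGet?_natCast, pvCond]

lemma pvMers_eq (X : String) :
    get_2_mers X
      = (pvIdxs X.toList).map (fun (i : Nat) =>
          PySem.Str.slice X (some ((i : Int) + 1)) (some ((i : Int) + 3))) := by
  unfold get_2_mers
  rw [PySem.Str.len_eq, pvRange_sub_two, List.foldl_map]
  simp only [pvCondInt_eq]
  rw [PySem.List.foldl_append_if]
  simp [pvIdxs]

lemma pvMer_get0 (X : String) (i : Nat) :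
    PySem.Str.pyGet? (PySem.Str.slice X (some ((i : Int) + 1)) (some ((i : Int) + 3))) 0
      = X.toList[i + 1]? := by
  simp only [pysem]
  simp only [pvCast1, pvCast3, PySem.List.slice_natCast]
  simp [show i + 3 - (i + 1) = 2 by omega, List.getElem?_drop]

lemma pvMer_get1 (X : String) (i : Nat) :
    PySem.Str.pyGet? (PySem.Str.slice X (some ((i : Int) + 1)) (some ((i : Int) + 3))) 1
      = X.toList[i + 2]? := by
  simp only [pysem]
  simp only [pvCast1, pvCast3, PySem.List.slice_natCast]
  simp [show i + 3 - (i + 1) = 2 by omega, List.getElem?_drop,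
    show i + 1 + 1 = i + 2 by omega]

lemma pvCountP_flip (a : Option Char) (f : Nat → Option Char) (l : List Nat) :
    List.countP (fun j => a == f j) l = List.countP (fun j => f j == a) l :=
  List.countP_congr (by intro j _; rw [Bool.beq_comm])

lemma pvA_eq (X Y : String) : string_kernel X Y = pvT X.toList Y.toList := by
  unfold string_kernel
  rw [pvMers_eq, pvMers_eq]
  simp only [List.foldl_map]
  simp only [pvMer_get0, pvMer_get1]
  simp only [add_assoc]
  simp only [PySem.List.foldl_add]
  simp only [PySem.List.sum_map_add_int, PySem.List.sum_map_const_int,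
    PySem.List.sum_map_ite_one_zero]
  simp [pvT, pvCountP_flip, add_assoc]

lemma pvGetD_fold (l : List Nat) (fk : Nat → Option Char) (d : PySem.Dict (Option Char) Int)
    (v : Option Char) :
    (l.foldl (fun d j => d.modify (fk j) 0 (fun x => x + 1)) d).getD v 0
      = d.getD v 0 + List.count v (l.map fk) := by
  rw [← List.foldl_map (f := fk)
        (g := fun (d : PySem.Dict (Option Char) Int) k => d.modify k 0 (fun x => x + 1))]
  exact PySem.Dict.getD_foldl_modify_add_one _ _ _

lemma pvB_eq (X Y : String) : string_kernel_alt X Y = pvT X.toList Y.toList := by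
  unfold string_kernel_alt
  rw [PySem.Str.len_eq, PySem.Str.len_eq, pvRange_sub_two, pvRange_sub_two]
  simp only [List.foldl_map]
  simp only [pvCast1, pvCast2, PySem.Str.pyGet?_natCast]
  rw [← List.foldl_filter, ← List.foldl_filter]
  rw [PySem.List.foldl_prod_mk (fun (s : Int) (_ : Nat) => s + 1)
        (fun (p : PySem.Dict (Option Char) Int × PySem.Dict (Option Char) Int) (j : Nat) =>
          (p.1.modify (Y.toList[j + 1]?) 0 (· + 1), p.2.modify (Y.toList[j + 2]?) 0 (· + 1)))]
  rw [PySem.List.foldl_prod_mk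
        (fun (d : PySem.Dict (Option Char) Int) (j : Nat) => d.modify (Y.toList[j + 1]?) 0 (· + 1))
        (fun (d : PySem.Dict (Option Char) Int) (j : Nat) => d.modify (Y.toList[j + 2]?) 0 (· + 1))]
  simp only [add_assoc]
  rw [PySem.List.foldl_add]
  simp only [pvGetD_fold, PySem.Dict.getD_empty, PySem.List.foldl_add, zero_add,
    List.count_eq_countP, List.countP_map]
  simp [pvT, pvIdxs, Function.comp_def, mul_comm]
  unfold pvCond
  ring

-- ===== VERDICT (by name: the statement is the Claim_ definition above) =====
theorem string_kernel_spec : Claim_equal_string_kernel := by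
  intro X Y _
  unfold Spec_string_kernel
  rw [pvA_eq, pvB_eq]
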